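-- pv_equiv track=rewrite | github.com/gabrielzv1233/py | utility/nearestpopcontsate/app.py | find_closest_under
-- ===== SOURCE A (Python) =====
-- def find_closest_under(target, locations):
--     """Find the closest location under the target population."""
--     closest = None
--     closest_diff = float("inf")
--
--     for loc in locations:
--         diff = target - loc["population"]
--         if 0 <= diff < closest_diff:  # Must be under the target
--             closest = loc
--             closest_diff = diff
--
--     return closest
-- ===== SOURCE B (Python) =====
-- def find_closest_under(target, locations):
--     """Find the closest location under the target population."""
--     under = [loc for loc in locations if loc["population"] <= target]
--     return max(under, key=lambda l: l["population"]) if under else None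
-- ===== Notes on version B (the rewrite author's own statement) =====
-- stated objective: simpler
-- what changed: A's single running-best loop over (closest, closest_diff) becomes a filter of the under-target locations followed by a built-in max on population (first maximum wins, matching A's first-wins tie-breaking), with no diff bookkeeping.
import Mathlib
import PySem

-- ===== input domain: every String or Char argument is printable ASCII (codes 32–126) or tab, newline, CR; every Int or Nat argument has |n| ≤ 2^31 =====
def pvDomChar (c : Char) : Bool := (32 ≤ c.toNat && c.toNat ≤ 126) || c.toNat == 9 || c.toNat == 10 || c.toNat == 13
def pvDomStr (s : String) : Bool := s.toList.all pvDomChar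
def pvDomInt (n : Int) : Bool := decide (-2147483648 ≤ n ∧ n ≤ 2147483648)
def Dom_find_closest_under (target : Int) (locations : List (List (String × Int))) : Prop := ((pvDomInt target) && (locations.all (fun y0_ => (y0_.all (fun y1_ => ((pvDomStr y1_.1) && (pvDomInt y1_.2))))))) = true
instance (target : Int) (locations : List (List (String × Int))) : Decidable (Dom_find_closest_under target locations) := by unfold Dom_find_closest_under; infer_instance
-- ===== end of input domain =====

-- B replaces A's running-best (closest, closest_diff) loop by a filter of the under-target
-- locations followed by a first-wins max on population (objective: simpler).

-- loc["population"]; Pre_ guarantees the key is present, so the .getD 0 default is never used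
-- (Python raises KeyError exactly where get? is none, and those inputs are outside Pre_).
def pvPop (loc : List (String × Int)) : Int :=
  ((PySem.Dict.mk loc).get? "population").getD 0

-- ===== PORT A =====
-- A's two loop variables closest / closest_diff update together, carried as one Option pair
-- (none ↔ closest = None ∧ closest_diff = inf; inf makes 'diff < closest_diff' always true).
def find_closest_under (target : Int) (locations : List (List (String × Int))) : Option (List (String × Int)) :=
  (locations.foldl
    (fun st loc =>
      let diff := target - pvPop loc
      match st with
      | none => if 0 ≤ diff then some (loc, diff) else none
      | some (c, cd) => if 0 ≤ diff ∧ diff < cd then some (loc, diff) else some (c, cd))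
    none).map Prod.fst

-- ===== PORT B =====
-- max(under, key=…) : Python's max keeps the current element unless a strictly greater key
-- appears, i.e. it returns the FIRST maximal element — ported as a foldl over the tail.
def find_closest_under_alt (target : Int) (locations : List (List (String × Int))) : Option (List (String × Int)) :=
  match locations.filter (fun loc => pvPop loc ≤ target) with
  | [] => none
  | h :: t => some (t.foldl (fun b l => if pvPop b < pvPop l then l else b) h)

-- ===== PRECONDITION & SPEC =====
-- Pre_ excludes exactly the inputs where loc["population"] raises KeyError in both programs:
-- some location lacks the "population" key.
def Pre_find_closest_under (target : Int) (locations : List (List (String × Int))) : Prop :=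
  ∀ loc ∈ locations, "population" ∈ loc.map Prod.fst
instance (target : Int) (locations : List (List (String × Int))) : Decidable (Pre_find_closest_under target locations) := by unfold Pre_find_closest_under; infer_instance

def pvWitness_find_closest_under : Int × (List (List (String × Int))) :=
  (7, [[("name", 1), ("population", 3)], [("population", 9)], [("population", 5)]])

def Spec_find_closest_under (target : Int) (locations : List (List (String × Int))) (out : Option (List (String × Int))) : Prop := out = find_closest_under_alt target locations
instance (target : Int) (locations : List (List (String × Int))) (out : Option (List (String × Int))) : Decidable (Spec_find_closest_under target locations out) := by unfold Spec_find_closest_under; infer_instance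

-- ===== CLAIM (what is proved, stated in full; the proofs are below) =====
def Claim_equal_find_closest_under : Prop := ∀ (target : Int) (locations : List (List (String × Int))), Dom_find_closest_under target locations → Pre_find_closest_under target locations → Spec_find_closest_under target locations (find_closest_under target locations)

-- ===== LEMMAS AND PROOFS =====

-- A's loop step, with the state as in the port.
def pvStepA (target : Int) (st : Option (List (String × Int) × Int)) (loc : List (String × Int)) :
    Option (List (String × Int) × Int) :=
  let diff := target - pvPop loc
  match st with
  | none => if 0 ≤ diff then some (loc, diff) else none
  | some (c, cd) => if 0 ≤ diff ∧ diff < cd then some (loc, diff) else some (c, cd)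

-- B's max step.
def pvStepB (b l : List (String × Int)) : List (String × Int) :=
  if pvPop b < pvPop l then l else b

-- Loop invariant: from a state (c, target - pvPop c) with pvPop c ≤ target, A's fold computes
-- exactly the first-wins maximum (by population) of c followed by the under-target elements.
lemma pvLoopA_some (target : Int) (ls : List (List (String × Int))) :
    ∀ c : List (String × Int), pvPop c ≤ target →
      ls.foldl (pvStepA target) (some (c, target - pvPop c)) =
        some (((ls.filter (fun l => pvPop l ≤ target)).foldl pvStepB c),
              target - pvPop ((ls.filter (fun l => pvPop l ≤ target)).foldl pvStepB c)) := by
  induction ls with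
  | nil => intro c _; simp
  | cons l ls ih =>
    intro c hc
    by_cases hl : pvPop l ≤ target
    · by_cases hlt : pvPop c < pvPop l
      · have hstep : pvStepA target (some (c, target - pvPop c)) l = some (l, target - pvPop l) := by
          simp [pvStepA]; omega
        have hsb : pvStepB c l = l := by simp [pvStepB, hlt]
        simp only [List.foldl_cons, hstep, List.filter_cons, hl, decide_true, if_pos, hsb]
        exact ih l hl
      · have hstep : pvStepA target (some (c, target - pvPop c)) l = some (c, target - pvPop c) := by
          simp [pvStepA]; omega
        have hsb : pvStepB c l = c := by simp [pvStepB, hlt]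
        simp only [List.foldl_cons, hstep, List.filter_cons, hl, decide_true, if_pos, hsb]
        exact ih c hc
    · have hstep : pvStepA target (some (c, target - pvPop c)) l = some (c, target - pvPop c) := by
        simp [pvStepA]; omega
      simp only [List.foldl_cons, hstep, List.filter_cons, hl, decide_false, if_neg]
      exact ih c hc

lemma pvLoopA_none (target : Int) (ls : List (List (String × Int))) :
    ls.foldl (pvStepA target) none =
      match ls.filter (fun l => pvPop l ≤ target) with
      | [] => none
      | h :: t => some (t.foldl pvStepB h, target - pvPop (t.foldl pvStepB h)) := by
  induction ls with
  | nil => simp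
  | cons l ls ih =>
    by_cases hl : pvPop l ≤ target
    · have hstep : pvStepA target none l = some (l, target - pvPop l) := by
        simp [pvStepA]; omega
      simp only [List.foldl_cons, hstep, List.filter_cons, hl, decide_true, if_pos]
      exact pvLoopA_some target ls l hl
    · have hstep : pvStepA target none l = none := by
        simp [pvStepA]; omega
      simp only [List.foldl_cons, hstep, List.filter_cons, hl, decide_false, if_neg]
      exact ih

-- ===== VERDICT (by name: the statement is the Claim_ definition above) =====
theorem find_closest_under_spec : Claim_equal_find_closest_under := by
  intro target locations _ _
  unfold Spec_find_closest_under find_closest_under find_closest_under_alt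
  have h := pvLoopA_none target locations
  show (locations.foldl (pvStepA target) none).map Prod.fst = _
  rw [h]
  cases locations.filter (fun l => pvPop l ≤ target) with
  | nil => rfl
  | cons h t => rfl
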